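-- pv_equiv track=rewrite | github.com/sfrimann/project-euler | p188/p188.py | hyperexp
-- ===== SOURCE A (Python) =====
-- def hyperexp(a, k, mod=None):
--     if k == 1:
--         return a
--     else:
--         if mod is None:
--             return pow(a, hyperexp(a, k-1))
--         else:
--             return pow(a, hyperexp(a, k-1, mod), mod)
-- ===== SOURCE B (Python) =====
-- def hyperexp(a, k, mod=None):
--     r = a
--     for _ in range(k - 1):
--         r = pow(a, r) if mod is None else pow(a, r, mod)
--     return r
-- ===== Notes on version B (the rewrite author's own statement) =====
-- stated objective: simpler
-- what changed: Replaced the top-down recursion (one Python stack frame per level of the tower) by a bottom-up accumulator loop that applies r = pow(a, r[, mod]) exactly k-1 times.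
-- outside the precondition, e.g. on hyperexp(-2, 2, None): A returns 0.25, B returns 0.25; on hyperexp(-1, 2, 5): A returns 4, B returns 4; on hyperexp(113, 2, -244): A returns -119, B returns -119
import Mathlib
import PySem

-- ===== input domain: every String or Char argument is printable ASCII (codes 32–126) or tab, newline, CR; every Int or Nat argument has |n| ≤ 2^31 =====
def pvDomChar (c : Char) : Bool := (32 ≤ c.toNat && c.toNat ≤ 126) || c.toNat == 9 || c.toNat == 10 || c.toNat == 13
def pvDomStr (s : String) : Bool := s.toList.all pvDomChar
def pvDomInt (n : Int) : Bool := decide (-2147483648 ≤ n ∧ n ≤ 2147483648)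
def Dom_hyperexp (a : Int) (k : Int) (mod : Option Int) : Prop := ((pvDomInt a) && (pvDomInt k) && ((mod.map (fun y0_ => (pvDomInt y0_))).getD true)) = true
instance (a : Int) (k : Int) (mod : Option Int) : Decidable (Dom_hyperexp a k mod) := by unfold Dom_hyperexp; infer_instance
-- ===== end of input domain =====

-- B replaces A's top-down recursion by a bottom-up accumulator loop (same tetration
-- recurrence, applied k-1 times); objective: simpler, no speed claim. Return value only.

-- Python's built-in pow(b, e, m) (both Pythons call it). PySem.Int.powMod is (b ^ e).mod m,
-- which materialises b ^ e and cannot be evaluated on the exponents the domain admits (~2^31),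
-- so it is ported by hand as binary exponentiation, reducing with Python's floor mod at each
-- step: exact for m ≠ 0 (for any m ≠ 0 floor mod depends only on the residue class, so
-- pyPowModGo b m e = (b ^ e).mod m); for m = 0 Python raises ValueError (outside Pre_).
def pyPowModGo (b : Int) (m : Int) (e : Nat) : Int :=
  if h : e = 0 then PySem.Int.mod 1 m
  else
    let h2 := pyPowModGo b m (e / 2)
    let s := PySem.Int.mod (h2 * h2) m
    if e % 2 = 1 then PySem.Int.mod (s * PySem.Int.mod b m) m else s
termination_by e
decreasing_by exact Nat.div_lt_self (Nat.pos_of_ne_zero h) one_lt_two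

def pyPowMod (b : Int) (e : Nat) (m : Int) : Int :=
  if m = 0 then 0 else pyPowModGo b m e

-- ===== PORT A =====
-- A recurses on k; the fuel is k.toNat (A raises RecursionError for k < 1, excluded by Pre_;
-- the fuel-0 branch is never reached inside Pre_).
def hyperexpA_go (a : Int) (mod : Option Int) : Nat → Int
  | 0 => a
  | 1 => a
  | n + 2 =>
    match mod with
    | none => a ^ (hyperexpA_go a mod (n + 1)).toNat
    | some m => pyPowMod a (hyperexpA_go a mod (n + 1)).toNat m

def hyperexp (a : Int) (k : Int) (mod : Option Int) : Int :=
  hyperexpA_go a mod k.toNat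

-- ===== PORT B =====
def hyperexp_alt (a : Int) (k : Int) (mod : Option Int) : Int :=
  (List.range (k - 1).toNat).foldl
    (fun r _ =>
      match mod with
      | none => a ^ r.toNat
      | some m => pyPowMod a r.toNat m) a

-- ===== PRECONDITION & SPEC =====
-- Pre_ excludes k < 1, where A recurses forever (RecursionError); for k ≥ 2 it also excludes
-- negative a and non-positive mod, where Python's pow leaves plain iterated nonnegative integer
-- exponentiation (float result for a negative exponent, modular-inverse semantics, or ValueError).
def Pre_hyperexp (a : Int) (k : Int) (mod : Option Int) : Prop :=
  1 ≤ k ∧ (k = 1 ∨ (0 ≤ a ∧ ∀ m : Int, mod = some m → 0 < m))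
instance (a : Int) (k : Int) (mod : Option Int) : Decidable (Pre_hyperexp a k mod) := by
  unfold Pre_hyperexp; infer_instance

def pvWitness_hyperexp : Int × Int × Option Int := (2, 2, some 5)

def Spec_hyperexp (a : Int) (k : Int) (mod : Option Int) (out : Int) : Prop := out = hyperexp_alt a k mod
instance (a : Int) (k : Int) (mod : Option Int) (out : Int) : Decidable (Spec_hyperexp a k mod out) := by unfold Spec_hyperexp; infer_instance

-- ===== CLAIM (what is proved, stated in full; the proofs are below) =====
def Claim_equal_hyperexp : Prop := ∀ (a : Int) (k : Int) (mod : Option Int), Dom_hyperexp a k mod → Pre_hyperexp a k mod → Spec_hyperexp a k mod (hyperexp a k mod)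

-- ===== LEMMAS AND PROOFS =====

-- One recursion level of A equals one more iteration of B's fold.
theorem hyperexpA_go_eq_foldl (a : Int) (mod : Option Int) (n : Nat) :
    hyperexpA_go a mod (n + 1) =
      (List.range n).foldl
        (fun r _ =>
          match mod with
          | none => a ^ r.toNat
          | some m => pyPowMod a r.toNat m) a := by
  induction n with
  | zero => rfl
  | succ n ih =>
    rw [List.range_succ, List.foldl_append, ← ih]
    cases mod <;> rfl

-- ===== VERDICT (by name: the statement is the Claim_ definition above) =====
theorem hyperexp_spec : Claim_equal_hyperexp := by
  intro a k mod _ hpre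
  have hk : 1 ≤ k := hpre.1
  have hkn : k.toNat = (k - 1).toNat + 1 := by omega
  unfold Spec_hyperexp hyperexp hyperexp_alt
  rw [hkn, hyperexpA_go_eq_foldl]
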